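-- pv_equiv track=rewrite | github.com/silanka007/biology-meets-programming | week-2/symbol_array.py | SymbolArray
-- ===== SOURCE A (Python) =====
-- def PatternCount(pattern, text):
--     count = 0
--     for i in range(len(text) - len(pattern) + 1):
--         window = i + len(pattern)
--         if text[i:window] == pattern:
--             count += 1
--     return count
--
-- def SymbolArray(genome, symbol):
--     array = {}
--     genomeLen = len(genome)
--     genomeHalfLen = genomeLen//2
--     extendedGenome = genome + genome[0:genomeHalfLen]
--
--     for i in range(genomeLen):
--         window = extendedGenome[i: i + genomeHalfLen]
--         array[i] = PatternCount(symbol, window)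
--     return array
-- ===== SOURCE B (Python) =====
-- def SymbolArray(genome, symbol):
--     n = len(genome)
--     h = n // 2
--     L = len(symbol)
--     ext = genome + genome[:h]
--     if L > h:
--         return {i: 0 for i in range(n)}
--     pref = [0]
--     for j in range(len(ext) - L + 1):
--         pref.append(pref[-1] + (1 if ext[j:j + L] == symbol else 0))
--     return {i: pref[i + h - L + 1] - pref[i] for i in range(n)}
-- ===== Notes on version B (the rewrite author's own statement) =====
-- stated objective: faster
-- what changed: Replaces the per-position rescan (PatternCount over each half-genome window) with one precomputed match-indicator prefix-sum array, so each window count is a single subtraction.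
import Mathlib
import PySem

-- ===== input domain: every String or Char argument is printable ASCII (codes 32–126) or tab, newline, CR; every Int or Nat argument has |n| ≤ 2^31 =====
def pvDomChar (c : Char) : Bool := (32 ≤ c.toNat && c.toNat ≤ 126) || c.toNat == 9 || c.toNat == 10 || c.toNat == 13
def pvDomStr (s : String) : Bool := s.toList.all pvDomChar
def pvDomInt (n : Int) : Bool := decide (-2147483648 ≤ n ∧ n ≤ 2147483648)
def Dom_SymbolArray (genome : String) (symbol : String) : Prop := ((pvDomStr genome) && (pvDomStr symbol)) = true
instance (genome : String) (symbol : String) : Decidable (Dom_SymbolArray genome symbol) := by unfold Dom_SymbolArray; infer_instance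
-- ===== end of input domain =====

-- B replaces A's per-window rescan by a prefix-sum over a precomputed match-indicator array (asymptotically faster); same return value everywhere.

-- ===== PORT A =====
def PatternCountA (pattern : List Char) (text : List Char) : Int :=
  (PySem.List.pyRange 0 ((text.length : Int) - (pattern.length : Int) + 1) 1).foldl
    (fun count i =>
      let window := i + (pattern.length : Int)
      if PySem.List.slice text (some i) (some window) = pattern then count + 1 else count)
    0

def SymbolArray (genome : String) (symbol : String) : List (Int × Int) :=
  let g := genome.toList
  let genomeLen : Int := (g.length : Int)
  let genomeHalfLen : Int := PySem.Int.floordiv genomeLen 2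
  let extendedGenome := g ++ PySem.List.slice g (some 0) (some genomeHalfLen)
  ((PySem.List.pyRange 0 genomeLen 1).foldl
      (fun (array : PySem.Dict Int Int) i =>
        array.insert i
          (PatternCountA symbol.toList
            (PySem.List.slice extendedGenome (some i) (some (i + genomeHalfLen)))))
      PySem.Dict.empty).items

-- ===== PORT B =====
def SymbolArray_alt (genome : String) (symbol : String) : List (Int × Int) :=
  let g := genome.toList
  let s := symbol.toList
  let n : Int := (g.length : Int)
  let h : Int := PySem.Int.floordiv n 2
  let L : Int := (s.length : Int)
  let ext := g ++ PySem.List.slice g none (some h)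
  if L > h then
    (PySem.List.pyRange 0 n 1).map (fun i => (i, (0 : Int)))
  else
    let pref := (PySem.List.pyRange 0 ((ext.length : Int) - L + 1) 1).foldl
      (fun pref j =>
        pref ++ [PySem.List.pyGetD pref (-1) 0 +
          (if PySem.List.slice ext (some j) (some (j + L)) = s then 1 else 0)])
      [(0 : Int)]
    (PySem.List.pyRange 0 n 1).map
      (fun i => (i, PySem.List.pyGetD pref (i + h - L + 1) 0 - PySem.List.pyGetD pref i 0))

-- ===== PRECONDITION & SPEC =====
def Spec_SymbolArray (genome : String) (symbol : String) (out : List (Int × Int)) : Prop := out = SymbolArray_alt genome symbol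
instance (genome : String) (symbol : String) (out : List (Int × Int)) : Decidable (Spec_SymbolArray genome symbol out) := by unfold Spec_SymbolArray; infer_instance

-- ===== CLAIM (what is proved, stated in full; the proofs are below) =====
def Claim_equal_SymbolArray : Prop := ∀ (genome : String) (symbol : String), Dom_SymbolArray genome symbol → Spec_SymbolArray genome symbol (SymbolArray genome symbol)

-- ===== LEMMAS AND PROOFS =====

-- indicator of a pattern match at position j of ext
def pvInd (ext s : List Char) (j : Nat) : Int :=
  if (ext.drop j).take s.length = s then 1 else 0

-- partial sums of the indicator
def pvF (f : Int → Int) (j : Nat) : Int := f (j : Int)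

-- A's PatternCount is a countP over the start positions
lemma patA_countP (pattern text : List Char) :
    PatternCountA pattern text =
      (List.countP
        (fun i => PySem.List.slice text (some i) (some (i + (pattern.length : Int))) == pattern)
        (PySem.List.pyRange 0 ((text.length : Int) - (pattern.length : Int) + 1) 1) : Nat) := by
  unfold PatternCountA
  rw [show (fun (count : Int) (i : Int) =>
      let window := i + (pattern.length : Int)
      if PySem.List.slice text (some i) (some window) = pattern then count + 1 else count)
    = (fun (count : Int) (i : Int) =>
      if (PySem.List.slice text (some i) (some (i + (pattern.length : Int))) == pattern) = true
        then count + 1 else count) from by funext c i; simp]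
  rw [PySem.List.foldl_count_if]
  simp

-- the prefix-sum loop of B builds exactly the partial sums
lemma pref_char (f : Int → Int) (k : Nat) :
    (PySem.List.pyRange 0 (k : Int) 1).foldl
      (fun p j => p ++ [PySem.List.pyGetD p (-1) 0 + f j]) [(0 : Int)]
    = (List.range (k + 1)).map (fun t => ((List.range t).map (pvF f)).sum) := by
  induction k with
  | zero => simp
  | succ k ih =>
    rw [show ((k + 1 : Nat) : Int) = (k : Int) + 1 by push_cast; ring,
      PySem.List.pyRange_one_succ_right (by positivity), List.foldl_append, ih]
    simp only [List.foldl_cons, List.foldl_nil]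
    rw [show (List.range (k + 1)).map (fun t => ((List.range t).map (pvF f)).sum)
        = (List.range k).map (fun t => ((List.range t).map (pvF f)).sum)
          ++ [((List.range k).map (pvF f)).sum] from by simp [List.range_succ]]
    rw [PySem.List.pyGetD_neg_one_append_singleton]
    simp [List.range_succ, pvF]

lemma pvPS_diff (f : Nat → Int) (a c : Nat) :
    ((List.range (a + c)).map f).sum - ((List.range a).map f).sum
      = ((List.range c).map (fun j => f (a + j))).sum := by
  rw [List.range_add, List.map_append, List.sum_append, List.map_map]
  ring_nf
  rfl

lemma pvInd_cast (ext s : List Char) (j : Nat) :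
    pvF (fun j => if PySem.List.slice ext (some j) (some (j + (s.length : Int))) = s
      then (1 : Int) else 0) j = pvInd ext s j := by
  show (if PySem.List.slice ext (some ((j : Int))) (some ((j : Int) + ((s.length : Nat) : Int))) = s
      then (1 : Int) else 0) = pvInd ext s j
  rw [show ((j : Int) + (s.length : Int)) = ((j : Int) + ((s.length : Nat) : Int)) from rfl,
    PySem.List.slice_natCast_add]
  rfl

lemma winA (ext s : List Char) (i hn : Nat) (hih : i + hn ≤ ext.length) :
    PatternCountA s (PySem.List.slice ext (some (i : Int)) (some ((i : Int) + (hn : Int)))) =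
      ((List.range (((hn : Int) - (s.length : Int) + 1).toNat)).map
        (fun j => pvInd ext s (i + j))).sum := by
  rw [PySem.List.slice_natCast_add, patA_countP]
  have hwl : (List.take hn (List.drop i ext)).length = hn := by
    simp; omega
  rw [hwl, PySem.List.pyRange_one, List.countP_map]
  rw [show (fun j => pvInd ext s (i + j))
      = (fun j => if ((List.take s.length (List.drop (i + j) ext) : List Char) == s) = true
          then (1 : Int) else 0) from funext fun j => by simp [pvInd]]
  rw [PySem.List.sum_map_ite_one_zero]
  simp only [sub_zero]
  congr 1
  apply List.countP_congr
  intro j hj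
  simp only [List.mem_range] at hj
  have hjle : j + s.length ≤ hn := by omega
  simp only [Function.comp]
  rw [show ((0 : Int) + (j : Nat) = ((j : Nat) : Int)) from by ring]
  rw [PySem.List.slice_natCast_add, List.drop_take, List.take_take,
    min_eq_left (by omega), List.drop_drop]

lemma pref_lookup (f : Int → Int) (k t : Nat) (ht : t ≤ k) :
    PySem.List.pyGetD
      ((PySem.List.pyRange 0 (k : Int) 1).foldl
        (fun p j => p ++ [PySem.List.pyGetD p (-1) 0 + f j]) [(0 : Int)]) (t : Int) 0
    = ((List.range t).map (pvF f)).sum := by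
  rw [pref_char, PySem.List.pyGetD_natCast, PySem.List.getD_map_range _ _ _ _ (by omega)]

lemma symbolArray_eq_alt (genome symbol : String) :
    SymbolArray genome symbol = SymbolArray_alt genome symbol := by
  unfold SymbolArray SymbolArray_alt
  simp only []
  set g := genome.toList with hg
  set s := symbol.toList with hs
  have hfd : PySem.Int.floordiv ((g.length : Int)) 2 = ((g.length / 2 : Nat) : Int) := by
    exact_mod_cast PySem.Int.floordiv_natCast g.length 2
  rw [hfd, PySem.List.slice_zero_start, PySem.List.slice_to_natCast]
  set nn := g.length with hnn
  set hn := nn / 2 with hhn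
  set Ln := s.length with hLn
  set E := g ++ g.take hn with hE
  have hhnle : hn ≤ nn := Nat.div_le_self _ _
  have hEl : E.length = nn + hn := by
    simp [hE, List.length_take]; omega
  rw [PySem.Dict.items_foldl_insert_fresh _ (fun i => i) _ _
    (fun a _ => PySem.Dict.contains_empty a)
    (by simpa using PySem.List.nodup_pyRange_one 0 (nn : Int))]
  rw [show (PySem.Dict.empty : PySem.Dict Int Int).items = [] from rfl, List.nil_append]
  split_ifs with hLh
  · -- symbol longer than the half-window: every count is 0
    apply List.map_congr_left
    intro i hi
    rw [PySem.List.mem_pyRange_one] at hi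
    obtain ⟨m, rfl⟩ : ∃ m : Nat, i = (m : Int) := ⟨i.toNat, (Int.toNat_of_nonneg hi.1).symm⟩
    have hm : m < nn := by exact_mod_cast hi.2
    rw [winA E s m hn (by omega)]
    rw [show ((hn : Int) - (Ln : Int) + 1).toNat = 0 from by omega]
    simp
  · -- main case: Ln ≤ hn
    have hLle : Ln ≤ hn := by omega
    rw [hEl]
    rw [show (((nn + hn : Nat) : Int)) - (Ln : Int) + 1 = (((nn + hn - Ln + 1 : Nat)) : Int) from by
      push_cast; omega]
    apply List.map_congr_left
    intro i hi
    rw [PySem.List.mem_pyRange_one] at hi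
    obtain ⟨m, rfl⟩ : ∃ m : Nat, i = (m : Int) := ⟨i.toNat, (Int.toNat_of_nonneg hi.1).symm⟩
    have hm : m < nn := by exact_mod_cast hi.2
    rw [winA E s m hn (by omega)]
    rw [show ((m : Int) + (hn : Int) - (Ln : Int) + 1) = (((m + (hn - Ln + 1) : Nat)) : Int) from by
      push_cast; omega]
    rw [pref_lookup _ _ _ (by omega), pref_lookup _ _ _ (by omega)]
    rw [pvPS_diff]
    rw [show ((hn : Int) - (Ln : Int) + 1).toNat = hn - Ln + 1 from by omega]
    congr 1
    exact congrArg List.sum (List.map_congr_left fun j _ => (pvInd_cast E s (m + j)).symm)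

-- ===== VERDICT (by name: the statement is the Claim_ definition above) =====
theorem SymbolArray_spec : Claim_equal_SymbolArray := by
  intro genome symbol _
  unfold Spec_SymbolArray
  exact symbolArray_eq_alt genome symbol
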